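-- pv_equiv track=rewrite | github.com/clawtv13/dog-training-landing | ai-automation-blog/scripts/performance-tracker.py | smart_label_clusters
-- ===== SOURCE A (Python) =====
-- def smart_label_clusters(cluster_keywords):
--     """
--     Map clusters to semantic labels based on keywords
--     """
--     mapping = {}
--
--     tool_keywords = {'tool', 'api', 'platform', 'software', 'service', 'app'}
--     ethics_keywords = {'ethics', 'privacy', 'bias', 'safety', 'risk', 'responsible'}
--     technical_keywords = {'code', 'technical', 'implementation', 'architecture', 'system', 'algorithm'}
--     business_keywords = {'business', 'revenue', 'pricing', 'customer', 'market', 'growth', 'founder'}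
--
--     for cluster_id, keywords in cluster_keywords.items():
--         keyword_set = set(keywords)
--
--         # Score each category
--         tool_score = len(keyword_set & tool_keywords)
--         ethics_score = len(keyword_set & ethics_keywords)
--         technical_score = len(keyword_set & technical_keywords)
--         business_score = len(keyword_set & business_keywords)
--
--         scores = {
--             0: tool_score,      # AI Tools
--             1: ethics_score,    # Ethics
--             2: technical_score, # Technical
--             3: business_score,  # Business
--             4: 0                # Random (fallback)
--         }
--
--         # Assign to highest scoring category
--         best_label = max(scores, key=scores.get)
--
--         # If no clear winner, mark as Random
--         if scores[best_label] == 0: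
--             best_label = 4
--
--         mapping[cluster_id] = best_label
--
--     return mapping
-- ===== SOURCE B (Python) =====
-- # One flattened keyword->category dict built once; each cluster is labelled by a
-- # single pass over its distinct keywords instead of four set intersections.
-- KW2CAT = {}
-- for _lab, _words in enumerate([
--         ('tool', 'api', 'platform', 'software', 'service', 'app'),
--         ('ethics', 'privacy', 'bias', 'safety', 'risk', 'responsible'),
--         ('code', 'technical', 'implementation', 'architecture', 'system', 'algorithm'),
--         ('business', 'revenue', 'pricing', 'customer', 'market', 'growth', 'founder')]):
--     for _w in _words:
--         KW2CAT[_w] = _lab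
--
--
-- def smart_label_clusters(cluster_keywords):
--     mapping = {}
--     for cluster_id, keywords in cluster_keywords.items():
--         counts = {0: 0, 1: 0, 2: 0, 3: 0}
--         for kw in set(keywords):
--             lab = KW2CAT.get(kw)
--             if lab is not None:
--                 counts[lab] += 1
--         best = 0
--         for lab in (1, 2, 3):
--             if counts[lab] > counts[best]:
--                 best = lab
--         if counts[best] == 0:
--             best = 4
--         mapping[cluster_id] = best
--     return mapping
-- ===== Notes on version B (the rewrite author's own statement) =====
-- stated objective: idiomatic
-- what changed: Replaces A's four per-cluster set intersections plus a max-over-dict with one module-level keyword-to-category dict, a single counting pass over each cluster's distinct keywords, and a first-strict-maximum scan of the four labels (one hash lookup per keyword instead of four set probes).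
import Mathlib
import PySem

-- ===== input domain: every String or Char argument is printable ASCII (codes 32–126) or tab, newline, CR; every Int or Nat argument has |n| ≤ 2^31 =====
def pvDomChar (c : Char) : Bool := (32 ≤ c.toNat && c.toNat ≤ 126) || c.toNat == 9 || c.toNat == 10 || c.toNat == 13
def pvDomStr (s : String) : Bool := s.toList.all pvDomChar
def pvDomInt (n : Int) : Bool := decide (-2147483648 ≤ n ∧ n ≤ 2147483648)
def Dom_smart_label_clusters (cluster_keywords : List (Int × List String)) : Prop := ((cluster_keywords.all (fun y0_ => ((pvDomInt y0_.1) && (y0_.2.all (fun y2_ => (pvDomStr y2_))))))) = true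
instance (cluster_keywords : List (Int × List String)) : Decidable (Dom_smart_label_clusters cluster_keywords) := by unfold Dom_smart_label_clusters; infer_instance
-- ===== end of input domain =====

-- B replaces A's four per-cluster set intersections by one flattened keyword→category
-- dict and a single counting pass over each cluster's distinct keywords (idiomatic).


-- ===== PORT A =====
def pvToolKeywords : PySem.Set String :=
  PySem.Set.ofList ["tool", "api", "platform", "software", "service", "app"]
def pvEthicsKeywords : PySem.Set String :=
  PySem.Set.ofList ["ethics", "privacy", "bias", "safety", "risk", "responsible"]
def pvTechnicalKeywords : PySem.Set String :=
  PySem.Set.ofList ["code", "technical", "implementation", "architecture", "system", "algorithm"]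
def pvBusinessKeywords : PySem.Set String :=
  PySem.Set.ofList ["business", "revenue", "pricing", "customer", "market", "growth", "founder"]

-- body of A's per-cluster loop: scores by set intersection, then max(scores, key=scores.get)
def pvLabelA (keywords : List String) : Int :=
  let keyword_set : PySem.Set String := PySem.Set.ofList keywords
  let tool_score := PySem.Set.len (PySem.Set.inter keyword_set pvToolKeywords)
  let ethics_score := PySem.Set.len (PySem.Set.inter keyword_set pvEthicsKeywords)
  let technical_score := PySem.Set.len (PySem.Set.inter keyword_set pvTechnicalKeywords)
  let business_score := PySem.Set.len (PySem.Set.inter keyword_set pvBusinessKeywords)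
  let scores : PySem.Dict Int Int :=
    PySem.Dict.ofList [(0, tool_score), (1, ethics_score), (2, technical_score), (3, business_score), (4, 0)]
  -- max over a non-empty dict's keys never returns none; .getD 0 only makes it total
  let best_label := (PySem.List.max? scores.keys (fun k => scores.getD k 0)).getD 0
  if scores.getD best_label 0 = 0 then 4 else best_label

def smart_label_clusters (cluster_keywords : List (Int × List String)) : List (Int × Int) :=
  (cluster_keywords.foldl (fun mapping p => mapping.insert p.1 (pvLabelA p.2)) PySem.Dict.empty).items

-- ===== PORT B =====
-- KW2CAT: every category keyword mapped to its label, flattened once at module level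
def pvKw2Cat : PySem.Dict String Int :=
  PySem.Dict.ofList
    [("tool", 0), ("api", 0), ("platform", 0), ("software", 0), ("service", 0), ("app", 0),
     ("ethics", 1), ("privacy", 1), ("bias", 1), ("safety", 1), ("risk", 1), ("responsible", 1),
     ("code", 2), ("technical", 2), ("implementation", 2), ("architecture", 2), ("system", 2), ("algorithm", 2),
     ("business", 3), ("revenue", 3), ("pricing", 3), ("customer", 3), ("market", 3), ("growth", 3), ("founder", 3)]

def pvLabelB (keywords : List String) : Int :=
  let counts : PySem.Dict Int Int :=
    (PySem.Set.ofList keywords).foldl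
      (fun c kw =>
        match pvKw2Cat.get? kw with
        | some lab => c.insert lab (c.getD lab 0 + 1)
        | none => c)
      (PySem.Dict.ofList [(0, 0), (1, 0), (2, 0), (3, 0)])
  let best := [(1 : Int), 2, 3].foldl
    (fun best lab => if counts.getD best 0 < counts.getD lab 0 then lab else best) 0
  if counts.getD best 0 = 0 then 4 else best

def smart_label_clusters_alt (cluster_keywords : List (Int × List String)) : List (Int × Int) :=
  (cluster_keywords.foldl (fun mapping p => mapping.insert p.1 (pvLabelB p.2)) PySem.Dict.empty).items

-- ===== PRECONDITION & SPEC =====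
def Spec_smart_label_clusters (cluster_keywords : List (Int × List String)) (out : List (Int × Int)) : Prop := out = smart_label_clusters_alt cluster_keywords
instance (cluster_keywords : List (Int × List String)) (out : List (Int × Int)) : Decidable (Spec_smart_label_clusters cluster_keywords out) := by unfold Spec_smart_label_clusters; infer_instance

-- ===== CLAIM (what is proved, stated in full; the proofs are below) =====
def Claim_equal_smart_label_clusters : Prop := ∀ (cluster_keywords : List (Int × List String)), Dom_smart_label_clusters cluster_keywords → Spec_smart_label_clusters cluster_keywords (smart_label_clusters cluster_keywords)

-- ===== LEMMAS AND PROOFS =====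

-- B's counting loop computes, for each label, how many keywords map to it
theorem pvCountsLemma (s : List String) (c : PySem.Dict Int Int) (L : Int) :
    (s.foldl
      (fun c kw =>
        match pvKw2Cat.get? kw with
        | some lab => c.insert lab (c.getD lab 0 + 1)
        | none => c) c).getD L 0
    = c.getD L 0 + (s.countP (fun kw => pvKw2Cat.get? kw == some L) : Int) := by
  induction s generalizing c with
  | nil => simp
  | cons kw rest ih =>
    cases h : pvKw2Cat.get? kw with
    | none => simp [List.foldl_cons, h, ih, List.countP_cons]
    | some lab =>
      simp only [List.foldl_cons, h, ih, List.countP_cons]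
      rw [PySem.Dict.getD_insert]
      by_cases hL : L = lab <;> simp [hL] <;> omega

-- the flattened dict agrees with the four membership tests
theorem pvKw2CatChar (k : String) :
    pvKw2Cat.get? k =
      (if k ∈ (pvToolKeywords : List String) then some 0
       else if k ∈ (pvEthicsKeywords : List String) then some 1
       else if k ∈ (pvTechnicalKeywords : List String) then some 2
       else if k ∈ (pvBusinessKeywords : List String) then some (3 : Int)
       else none) := by
  have hmk : pvKw2Cat = PySem.Dict.mk [("tool", 0), ("api", 0), ("platform", 0), ("software", 0), ("service", 0), ("app", 0), ("ethics", 1), ("privacy", 1), ("bias", 1), ("safety", 1), ("risk", 1), ("responsible", 1), ("code", 2), ("technical", 2), ("implementation", 2), ("architecture", 2), ("system", 2), ("algorithm", 2), ("business", 3), ("revenue", 3), ("pricing", 3), ("customer", 3), ("market", 3), ("growth", 3), ("founder", 3)] := by decide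
  by_cases h : k ∈ (["tool", "api", "platform", "software", "service", "app", "ethics", "privacy", "bias", "safety", "risk", "responsible", "code", "technical", "implementation", "architecture", "system", "algorithm", "business", "revenue", "pricing", "customer", "market", "growth", "founder"] : List String)
  · fin_cases h <;> decide
  · simp only [List.mem_cons, List.not_mem_nil, or_false, not_or] at h
    obtain ⟨h0, h1, h2, h3, h4, h5, h6, h7, h8, h9, h10, h11, h12, h13, h14, h15, h16, h17, h18, h19, h20, h21, h22, h23, h24⟩ := h
    rw [hmk]
    simp [PySem.Dict.get?_mk_cons, pvToolKeywords, pvEthicsKeywords, pvTechnicalKeywords,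
      pvBusinessKeywords, PySem.Set.mem_ofList, PySem.Dict.get?, PySem.Dict.empty, Ne.symm h0, Ne.symm h1, Ne.symm h2, Ne.symm h3, Ne.symm h4, Ne.symm h5, Ne.symm h6, Ne.symm h7, Ne.symm h8, Ne.symm h9, Ne.symm h10, Ne.symm h11, Ne.symm h12, Ne.symm h13, Ne.symm h14, Ne.symm h15, Ne.symm h16, Ne.symm h17, Ne.symm h18, Ne.symm h19, Ne.symm h20, Ne.symm h21, Ne.symm h22, Ne.symm h23, Ne.symm h24, h0, h1, h2, h3, h4, h5, h6, h7, h8, h9, h10, h11, h12, h13, h14, h15, h16, h17, h18, h19, h20, h21, h22, h23, h24]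

-- A's intersection score equals B's count, per category
theorem pvScoreEq (s : List String) (cat : PySem.Set String) (L : Int)
    (hcat : ∀ k, (pvKw2Cat.get? k == some L) = cat.contains k) :
    PySem.Set.len (PySem.Set.inter (PySem.Set.ofList s) cat)
      = ((PySem.Set.ofList s).countP (fun kw => pvKw2Cat.get? kw == some L) : Int) := by
  simp only [PySem.Set.len, PySem.Set.inter, List.countP_eq_length_filter.symm]
  congr 1
  refine List.countP_congr (fun k _ => ?_)
  rw [hcat]

theorem pvCounts0 (L : Int) :
    (PySem.Dict.ofList [((0:Int),(0:Int)),(1,0),(2,0),(3,0)]).getD L 0 = 0 := by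
  simp [PySem.Dict.ofList, PySem.Dict.update, PySem.Dict.getD_insert, PySem.Dict.getD_empty]

theorem pvCat0 (k : String) : (pvKw2Cat.get? k == some (0 : Int)) = PySem.Set.contains pvToolKeywords k := by
  by_cases h : k ∈ (["tool", "api", "platform", "software", "service", "app"] : List String)
  · fin_cases h <;> decide
  · have h' : k ∉ (pvToolKeywords : List String) := by
      simpa [pvToolKeywords, PySem.Set.mem_ofList] using h
    have hc : PySem.Set.contains pvToolKeywords k = false := by
      simp only [Bool.eq_false_iff, Ne, PySem.Set.contains_iff]; exact h'
    rw [hc, pvKw2CatChar]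
    split_ifs with h1 h2 h3 h4 <;> simp_all
theorem pvCat1 (k : String) : (pvKw2Cat.get? k == some (1 : Int)) = PySem.Set.contains pvEthicsKeywords k := by
  by_cases h : k ∈ (["ethics", "privacy", "bias", "safety", "risk", "responsible"] : List String)
  · fin_cases h <;> decide
  · have h' : k ∉ (pvEthicsKeywords : List String) := by
      simpa [pvEthicsKeywords, PySem.Set.mem_ofList] using h
    have hc : PySem.Set.contains pvEthicsKeywords k = false := by
      simp only [Bool.eq_false_iff, Ne, PySem.Set.contains_iff]; exact h'
    rw [hc, pvKw2CatChar]
    split_ifs with h1 h2 h3 h4 <;> simp_all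
theorem pvCat2 (k : String) : (pvKw2Cat.get? k == some (2 : Int)) = PySem.Set.contains pvTechnicalKeywords k := by
  by_cases h : k ∈ (["code", "technical", "implementation", "architecture", "system", "algorithm"] : List String)
  · fin_cases h <;> decide
  · have h' : k ∉ (pvTechnicalKeywords : List String) := by
      simpa [pvTechnicalKeywords, PySem.Set.mem_ofList] using h
    have hc : PySem.Set.contains pvTechnicalKeywords k = false := by
      simp only [Bool.eq_false_iff, Ne, PySem.Set.contains_iff]; exact h'
    rw [hc, pvKw2CatChar]
    split_ifs with h1 h2 h3 h4 <;> simp_all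
theorem pvCat3 (k : String) : (pvKw2Cat.get? k == some (3 : Int)) = PySem.Set.contains pvBusinessKeywords k := by
  by_cases h : k ∈ (["business", "revenue", "pricing", "customer", "market", "growth", "founder"] : List String)
  · fin_cases h <;> decide
  · have h' : k ∉ (pvBusinessKeywords : List String) := by
      simpa [pvBusinessKeywords, PySem.Set.mem_ofList] using h
    have hc : PySem.Set.contains pvBusinessKeywords k = false := by
      simp only [Bool.eq_false_iff, Ne, PySem.Set.contains_iff]; exact h'
    rw [hc, pvKw2CatChar]
    split_ifs with h1 h2 h3 h4 <;> simp_all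

-- the selection step: A's max-over-dict equals B's first-strict-max scan
set_option maxHeartbeats 1000000 in
theorem pvSelectEqB (d : PySem.Dict Int Int) (t e c b : Int)
    (ht : 0 ≤ t) (he : 0 ≤ e) (hc : 0 ≤ c) (hb : 0 ≤ b)
    (hv0 : d.getD 0 0 = t) (hv1 : d.getD 1 0 = e) (hv2 : d.getD 2 0 = c) (hv3 : d.getD 3 0 = b) :
    (let scores : PySem.Dict Int Int := PySem.Dict.ofList [(0, t), (1, e), (2, c), (3, b), (4, 0)]
     let best_label := (PySem.List.max? scores.keys (fun k => scores.getD k 0)).getD 0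
     if scores.getD best_label 0 = 0 then 4 else best_label)
    = (let best := [(1 : Int), 2, 3].foldl
         (fun best lab => if d.getD best 0 < d.getD lab 0 then lab else best) 0
       if d.getD best 0 = 0 then 4 else best) := by
  have hd : ∀ (L : Int), (PySem.Dict.ofList [((0:Int), t), (1, e), (2, c), (3, b), (4, 0)]).getD L 0
      = if L = 0 then t else if L = 1 then e else if L = 2 then c else if L = 3 then b else 0 := by
    intro L
    simp [PySem.Dict.ofList, PySem.Dict.update, PySem.Dict.getD_insert, PySem.Dict.getD_empty]
    split_ifs <;> omega
  have hk : (PySem.Dict.ofList [((0:Int), t), (1, e), (2, c), (3, b), (4, 0)]).keys = [0,1,2,3,4] := by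
    simp [PySem.Dict.ofList, PySem.Dict.update, PySem.Dict.insert, PySem.Dict.empty, PySem.Dict.keys, PySem.Dict.contains]
  simp only [hk, PySem.List.max?, List.foldl_cons, List.foldl_nil, hd, hv0, hv1, hv2, hv3]
  norm_num
  by_cases h1 : t < e
  · simp only [if_pos h1, if_neg (not_le.mpr h1)]
    simp only [hv0, hv1, hv2, hv3]
    norm_num
    by_cases h2 : e < c
    · simp only [if_pos h2, if_neg (not_le.mpr h2)]
      simp only [hv0, hv1, hv2, hv3]
      norm_num
      by_cases h3 : c < b
      · simp only [if_pos h3, if_neg (not_le.mpr h3)]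
        simp only [hv0, hv1, hv2, hv3]
        norm_num
        split_ifs <;> first | omega | (simp_all only [Option.getD_some]; omega) | simp_all only [Option.getD_some]
      · simp only [if_neg h3, if_pos (not_lt.mp h3)]
        simp only [hv0, hv1, hv2, hv3]
        norm_num
        split_ifs <;> first | omega | (simp_all only [Option.getD_some]; omega) | simp_all only [Option.getD_some]
    · simp only [if_neg h2, if_pos (not_lt.mp h2)]
      simp only [hv0, hv1, hv2, hv3]
      norm_num
      by_cases h4 : e < b
      · simp only [if_pos h4, if_neg (not_le.mpr h4)]
        simp only [hv0, hv1, hv2, hv3]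
        norm_num
        split_ifs <;> first | omega | (simp_all only [Option.getD_some]; omega) | simp_all only [Option.getD_some]
      · simp only [if_neg h4, if_pos (not_lt.mp h4)]
        simp only [hv0, hv1, hv2, hv3]
        norm_num
        split_ifs <;> first | omega | (simp_all only [Option.getD_some]; omega) | simp_all only [Option.getD_some]
  · simp only [if_neg h1, if_pos (not_lt.mp h1)]
    simp only [hv0, hv1, hv2, hv3]
    norm_num
    by_cases h5 : t < c
    · simp only [if_pos h5, if_neg (not_le.mpr h5)]
      simp only [hv0, hv1, hv2, hv3]
      norm_num
      by_cases h6 : c < b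
      · simp only [if_pos h6, if_neg (not_le.mpr h6)]
        simp only [hv0, hv1, hv2, hv3]
        norm_num
        split_ifs <;> first | omega | (simp_all only [Option.getD_some]; omega) | simp_all only [Option.getD_some]
      · simp only [if_neg h6, if_pos (not_lt.mp h6)]
        simp only [hv0, hv1, hv2, hv3]
        norm_num
        split_ifs <;> first | omega | (simp_all only [Option.getD_some]; omega) | simp_all only [Option.getD_some]
    · simp only [if_neg h5, if_pos (not_lt.mp h5)]
      simp only [hv0, hv1, hv2, hv3]
      norm_num
      by_cases h7 : t < b
      · simp only [if_pos h7, if_neg (not_le.mpr h7)]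
        simp only [hv0, hv1, hv2, hv3]
        norm_num
        split_ifs <;> first | omega | (simp_all only [Option.getD_some]; omega) | simp_all only [Option.getD_some]
      · simp only [if_neg h7, if_pos (not_lt.mp h7)]
        simp only [hv0, hv1, hv2, hv3]
        norm_num
        split_ifs <;> first | omega | (simp_all only [Option.getD_some]; omega) | simp_all only [Option.getD_some]

set_option maxHeartbeats 2000000 in
theorem pvLabelEq (kws : List String) : pvLabelA kws = pvLabelB kws := by
  simp only [pvLabelA]
  rw [pvScoreEq kws pvToolKeywords 0 pvCat0, pvScoreEq kws pvEthicsKeywords 1 pvCat1,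
      pvScoreEq kws pvTechnicalKeywords 2 pvCat2, pvScoreEq kws pvBusinessKeywords 3 pvCat3]
  exact pvSelectEqB
    ((PySem.Set.ofList kws).foldl
      (fun c kw =>
        match pvKw2Cat.get? kw with
        | some lab => c.insert lab (c.getD lab 0 + 1)
        | none => c)
      (PySem.Dict.ofList [(0, 0), (1, 0), (2, 0), (3, 0)])) _ _ _ _
    (Int.natCast_nonneg _) (Int.natCast_nonneg _) (Int.natCast_nonneg _) (Int.natCast_nonneg _)
    (by simp [pvCountsLemma, pvCounts0]) (by simp [pvCountsLemma, pvCounts0])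
    (by simp [pvCountsLemma, pvCounts0]) (by simp [pvCountsLemma, pvCounts0])

-- ===== VERDICT (by name: the statement is the Claim_ definition above) =====
theorem smart_label_clusters_spec : Claim_equal_smart_label_clusters := by
  intro cks _
  unfold Spec_smart_label_clusters smart_label_clusters smart_label_clusters_alt
  have h : (fun (m : PySem.Dict Int Int) (p : Int × List String) => m.insert p.1 (pvLabelA p.2))
         = (fun (m : PySem.Dict Int Int) (p : Int × List String) => m.insert p.1 (pvLabelB p.2)) := by
    funext m p; rw [pvLabelEq]
  rw [h]
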